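-- pv_equiv track=rewrite | github.com/JoseBlanca/seq_crumbs | crumbs/utils/seq_utils.py | get_uppercase_segments
-- ===== SOURCE A (Python) =====
-- import itertools
--
-- def get_uppercase_segments(string):
--     '''It detects the unmasked regions of a sequence
--
--     It returns a list of (start, end) tuples'''
--     start = 0
--     for is_upper, group in itertools.groupby(string, lambda x: x.isupper()):
--         group = list(group)
--         end = start + len(group) - 1
--         if is_upper:
--             yield start, end
--         start = end + 1
-- ===== SOURCE B (Python) =====
-- def get_uppercase_segments(string):
--     '''It detects the unmasked regions of a sequence
--
--     It returns a list of (start, end) tuples'''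
--     in_run = False
--     run_start = 0
--     for i, char in enumerate(string):
--         if char.isupper():
--             if not in_run:
--                 run_start = i
--                 in_run = True
--         else:
--             if in_run:
--                 yield run_start, i - 1
--                 in_run = False
--     if in_run:
--         yield run_start, len(string) - 1
-- ===== Notes on version B (the rewrite author's own statement) =====
-- stated objective: idiomatic
-- what changed: Replaced the itertools.groupby pass that materialises each run as a list with a direct single index scan keeping an in_run flag and run_start, flushing the open run after the loop.
import Mathlib
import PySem

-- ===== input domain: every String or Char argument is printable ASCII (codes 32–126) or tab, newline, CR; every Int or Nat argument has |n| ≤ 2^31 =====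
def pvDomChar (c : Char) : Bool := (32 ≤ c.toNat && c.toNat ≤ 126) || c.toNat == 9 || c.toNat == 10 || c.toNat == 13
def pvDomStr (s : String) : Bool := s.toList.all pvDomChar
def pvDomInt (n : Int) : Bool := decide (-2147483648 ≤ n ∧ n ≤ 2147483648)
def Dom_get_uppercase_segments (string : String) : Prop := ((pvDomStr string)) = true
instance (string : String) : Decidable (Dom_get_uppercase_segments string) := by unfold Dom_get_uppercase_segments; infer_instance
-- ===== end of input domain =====

-- B replaces the itertools.groupby pass (materialising each group) by a direct single
-- index scan keeping an 'in_run' flag and the run's start (objective: idiomatic/simpler).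

-- ===== PORT A =====
-- itertools.groupby(string, isupper): successive runs of equal key, as (key, group) pairs
def pvGroupBy : List Char → List (Bool × List Char)
  | [] => []
  | c :: cs =>
    match pvGroupBy cs with
    | [] => [(PySem.Chars.isupper c, [c])]
    | (b, g) :: rest =>
      if PySem.Chars.isupper c = b then (b, c :: g) :: rest
      else (PySem.Chars.isupper c, [c]) :: (b, g) :: rest

-- the for-loop over the groups, carrying 'start'
def pvSegsA (start : Int) : List (Bool × List Char) → List (Int × Int)
  | [] => []
  | (is_upper, group) :: rest =>
    let «end» : Int := start + (group.length : Int) - 1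
    (if is_upper then [(start, «end»)] else []) ++ pvSegsA («end» + 1) rest

def get_uppercase_segments (string : String) : List (Int × Int) :=
  pvSegsA 0 (pvGroupBy string.toList)

-- ===== PORT B =====
-- single scan with state (i, in_run, run_start); flush the open run at the end
def pvScanB : List Char → Int → Bool → Int → List (Int × Int)
  | [], i, in_run, run_start => if in_run then [(run_start, i - 1)] else []
  | c :: cs, i, in_run, run_start =>
    if PySem.Chars.isupper c then
      if in_run then pvScanB cs (i + 1) true run_start
      else pvScanB cs (i + 1) true i
    else
      if in_run then (run_start, i - 1) :: pvScanB cs (i + 1) false run_start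
      else pvScanB cs (i + 1) false run_start

def get_uppercase_segments_alt (string : String) : List (Int × Int) :=
  pvScanB string.toList 0 false 0

-- ===== PRECONDITION & SPEC =====
def Spec_get_uppercase_segments (string : String) (out : List (Int × Int)) : Prop := out = get_uppercase_segments_alt string
instance (string : String) (out : List (Int × Int)) : Decidable (Spec_get_uppercase_segments string out) := by unfold Spec_get_uppercase_segments; infer_instance

-- ===== CLAIM (what is proved, stated in full; the proofs are below) =====
def Claim_equal_get_uppercase_segments : Prop := ∀ (string : String), Dom_get_uppercase_segments string → Spec_get_uppercase_segments string (get_uppercase_segments string)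

-- ===== LEMMAS AND PROOFS =====

-- inside a run started at rs: what B still produces, expressed over A's groups
def pvConsume (rs i : Int) (gs : List (Bool × List Char)) : List (Int × Int) :=
  match gs with
  | (true, g) :: rest => (rs, i + (g.length : Int) - 1) :: pvSegsA (i + (g.length : Int)) rest
  | _ => (rs, i - 1) :: pvSegsA i gs

theorem pvScanB_eq (s : List Char) : ∀ (i rs : Int),
    pvScanB s i false rs = pvSegsA i (pvGroupBy s) ∧
    pvScanB s i true rs = pvConsume rs i (pvGroupBy s) := by
  induction s with
  | nil => intro i rs; simp [pvScanB, pvGroupBy, pvSegsA, pvConsume]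
  | cons c cs ih =>
    intro i rs
    rcases h : pvGroupBy cs with _ | ⟨⟨b, g⟩, rest⟩ <;>
      by_cases hu : PySem.Chars.isupper c = true <;> constructor
    · have := (ih (i+1) i).2
      simp [pvConsume, h, pvSegsA] at this
      simp [pvScanB, pvGroupBy, h, hu, pvSegsA, this]
    · have := (ih (i+1) rs).2
      simp [pvConsume, h, pvSegsA] at this
      simp [pvScanB, pvGroupBy, h, hu, pvConsume, pvSegsA, this]
    · simp [pvScanB, pvGroupBy, h, hu, pvSegsA, (ih (i+1) rs).1]
    · simp [pvScanB, pvGroupBy, h, hu, pvConsume, pvSegsA, (ih (i+1) rs).1]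
    · by_cases hb : b = true
      · subst hb
        have := (ih (i+1) i).2
        simp [pvConsume, h] at this
        simp [pvScanB, pvGroupBy, h, hu, pvSegsA, this]
        constructor <;> first | trivial | ring
      · simp only [Bool.not_eq_true] at hb; subst hb
        have := (ih (i+1) i).2
        simp [pvConsume, h, pvSegsA] at this
        simp [pvScanB, pvGroupBy, h, hu, pvSegsA, this]
    · by_cases hb : b = true
      · subst hb
        have := (ih (i+1) rs).2
        simp [pvConsume, h] at this
        simp [pvScanB, pvGroupBy, h, hu, pvConsume, pvSegsA, this]
        constructor <;> first | trivial | ring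
      · simp only [Bool.not_eq_true] at hb; subst hb
        have := (ih (i+1) rs).2
        simp [pvConsume, h, pvSegsA] at this
        simp [pvScanB, pvGroupBy, h, hu, pvConsume, pvSegsA, this]
    · by_cases hb : b = true
      · subst hb
        have := (ih (i+1) rs).1
        simp [h, pvSegsA] at this
        simp [pvScanB, pvGroupBy, h, hu, pvSegsA, this]
      · simp only [Bool.not_eq_true] at hb; subst hb
        have := (ih (i+1) rs).1
        simp [h, pvSegsA] at this
        simp [pvScanB, pvGroupBy, h, hu, pvSegsA, this]
        congr 1; ring
    · by_cases hb : b = true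
      · subst hb
        have := (ih (i+1) rs).1
        simp [h, pvSegsA] at this
        simp [pvScanB, pvGroupBy, h, hu, pvConsume, pvSegsA, this]
      · simp only [Bool.not_eq_true] at hb; subst hb
        have := (ih (i+1) rs).1
        simp [h, pvSegsA] at this
        simp [pvScanB, pvGroupBy, h, hu, pvConsume, pvSegsA, this]
        congr 1; ring

-- ===== VERDICT (by name: the statement is the Claim_ definition above) =====
theorem get_uppercase_segments_spec : Claim_equal_get_uppercase_segments := by
  intro s _
  unfold Spec_get_uppercase_segments get_uppercase_segments get_uppercase_segments_alt
  exact ((pvScanB_eq s.toList 0 0).1).symm
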